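-- pv_equiv track=rewrite | github.com/akmalsoliev/dbt-glue | tests/unit/test_ci_config.py | _dict_diff_keys
-- ===== SOURCE A (Python) =====
-- def _dict_diff_keys(expected, actual):
--     """Return a summary of top-level keys that differ between two dicts."""
--     diffs = []
--     for k in sorted(set(list(expected.keys()) + list(actual.keys()))):
--         if k not in expected:
--             diffs.append(f"+{k} (added)")
--         elif k not in actual:
--             diffs.append(f"-{k} (removed)")
--         elif expected[k] != actual[k]:
--             diffs.append(f"~{k} (changed)")
--     return diffs
-- ===== SOURCE B (Python) =====
-- def _dict_diff_keys(expected, actual):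
--     """Return a summary of top-level keys that differ between two dicts."""
--     ek, ak = set(expected.keys()), set(actual.keys())
--     pairs = [(k, f"+{k} (added)") for k in ak - ek]
--     pairs += [(k, f"-{k} (removed)") for k in ek - ak]
--     pairs += [(k, f"~{k} (changed)") for k in ek & ak if expected[k] != actual[k]]
--     pairs.sort(key=lambda p: p[0])
--     return [msg for _, msg in pairs]
-- ===== Notes on version B (the rewrite author's own statement) =====
-- stated objective: alternative
-- what changed: Replaces the single pass over the sorted union of keys with three-branch dispatch by set algebra: added/removed/changed key groups are computed separately with set difference and intersection, tagged, merged and sorted by key at the end.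
import Mathlib
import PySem

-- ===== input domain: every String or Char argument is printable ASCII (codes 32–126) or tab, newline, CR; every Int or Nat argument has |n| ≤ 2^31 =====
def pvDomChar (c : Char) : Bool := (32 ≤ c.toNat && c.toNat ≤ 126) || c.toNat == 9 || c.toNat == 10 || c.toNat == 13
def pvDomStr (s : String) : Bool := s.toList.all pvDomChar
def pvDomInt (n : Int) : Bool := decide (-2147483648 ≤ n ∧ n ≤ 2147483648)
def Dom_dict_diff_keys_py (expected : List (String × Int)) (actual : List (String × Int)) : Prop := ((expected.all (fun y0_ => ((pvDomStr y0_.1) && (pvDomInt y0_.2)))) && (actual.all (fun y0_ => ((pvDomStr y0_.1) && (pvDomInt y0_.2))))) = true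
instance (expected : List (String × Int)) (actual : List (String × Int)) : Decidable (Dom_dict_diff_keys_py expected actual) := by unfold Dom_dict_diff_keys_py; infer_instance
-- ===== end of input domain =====

-- B computes the added/removed/changed key groups by set algebra and sorts the tagged pairs at the end,
-- instead of A's single branch-dispatching pass over the sorted union of keys (objective: alternative).

-- ===== PORT A =====
-- Literal port of A: iterate over sorted(set(expected.keys() + actual.keys())) with membership branches.
def dict_diff_keys_py (expected : List (String × Int)) (actual : List (String × Int)) : List String :=
  let e := PySem.Dict.ofList expected
  let a := PySem.Dict.ofList actual
  let ks := PySem.List.sorted (PySem.Set.ofList (e.keys ++ a.keys)) (fun k => k) false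
  ks.foldl (fun diffs k =>
    if !(e.contains k) then diffs ++ ["+" ++ k ++ " (added)"]
    else if !(a.contains k) then diffs ++ ["-" ++ k ++ " (removed)"]
    else if e.get? k ≠ a.get? k then diffs ++ ["~" ++ k ++ " (changed)"]
    else diffs) []

-- ===== PORT B =====
-- Literal port of B: three set-algebra groups of (key, message) pairs, merged and sorted by key.
def dict_diff_keys_py_alt (expected : List (String × Int)) (actual : List (String × Int)) : List String :=
  let e := PySem.Dict.ofList expected
  let a := PySem.Dict.ofList actual
  let ek : PySem.Set String := PySem.Set.ofList e.keys
  let ak : PySem.Set String := PySem.Set.ofList a.keys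
  let pairs :=
    (PySem.Set.diff ak ek).map (fun k => (k, "+" ++ k ++ " (added)"))
    ++ (PySem.Set.diff ek ak).map (fun k => (k, "-" ++ k ++ " (removed)"))
    ++ ((PySem.Set.inter ek ak).filter (fun k => decide (e.get? k ≠ a.get? k))).map
        (fun k => (k, "~" ++ k ++ " (changed)"))
  (PySem.List.sorted pairs (fun p => p.1) false).map (fun p => p.2)

-- ===== PRECONDITION & SPEC =====
def Spec_dict_diff_keys_py (expected : List (String × Int)) (actual : List (String × Int)) (out : List String) : Prop := out = dict_diff_keys_py_alt expected actual
instance (expected : List (String × Int)) (actual : List (String × Int)) (out : List String) : Decidable (Spec_dict_diff_keys_py expected actual out) := by unfold Spec_dict_diff_keys_py; infer_instance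

-- ===== CLAIM (what is proved, stated in full; the proofs are below) =====
def Claim_equal_dict_diff_keys_py : Prop := ∀ (expected : List (String × Int)) (actual : List (String × Int)), Dom_dict_diff_keys_py expected actual → Spec_dict_diff_keys_py expected actual (dict_diff_keys_py expected actual)

-- ===== LEMMAS AND PROOFS =====

-- per-key branch of A, and its (key, message) pairing
def pvG (e a : PySem.Dict String Int) (k : String) : List String :=
  if !(e.contains k) then ["+" ++ k ++ " (added)"]
  else if !(a.contains k) then ["-" ++ k ++ " (removed)"]
  else if e.get? k ≠ a.get? k then ["~" ++ k ++ " (changed)"]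
  else []

def pvGP (e a : PySem.Dict String Int) (k : String) : List (String × String) :=
  (pvG e a k).map (fun m => (k, m))

theorem pv_flatMap_congr_mem {α β : Type} (l : List α) (f g : α → List β)
    (H : ∀ x ∈ l, f x = g x) : l.flatMap f = l.flatMap g := by
  induction l with
  | nil => rfl
  | cons x l ih => simp_all [List.flatMap_cons]

theorem pv_flatMap_eq_map {α β : Type} (l : List α) (f : α → List β) (h : α → β)
    (H : ∀ x ∈ l, f x = [h x]) : l.flatMap f = l.map h := by
  induction l with
  | nil => rfl
  | cons x l ih => simp_all [List.flatMap_cons]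

theorem pv_flatMap_if_singleton {α β : Type} (l : List α) (p : α → Bool) (h : α → β) :
    l.flatMap (fun x => if p x then [h x] else []) = (l.filter p).map h := by
  induction l with
  | nil => rfl
  | cons x l ih =>
    by_cases hx : p x <;> simp_all [List.flatMap_cons]

theorem pv_flatMap_append_perm {α β : Type} (l : List α) (f g : α → List β) :
    (l.flatMap (fun x => f x ++ g x)).Perm (l.flatMap f ++ l.flatMap g) := by
  induction l with
  | nil => simp
  | cons x l ih =>
    simp only [List.flatMap_cons, List.append_assoc]
    refine ((ih.append_left _).append_left _).trans ?_
    exact ((List.perm_append_comm_assoc _ _ _).append_left _)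

theorem pv_pairwise_flatMap {α β : Type} [LinearOrder α] (l : List α) (f : α → List (α × β))
    (h1 : ∀ k p, p ∈ f k → p.1 = k) (h2 : ∀ k, (f k).Pairwise (fun a b => a.1 < b.1)) :
    l.Pairwise (· < ·) → (l.flatMap f).Pairwise (fun a b => a.1 < b.1) := by
  induction l with
  | nil => intro _; simp
  | cons x l ih =>
    intro hp
    rw [List.pairwise_cons] at hp
    rw [List.flatMap_cons, List.pairwise_append]
    refine ⟨h2 x, ih hp.2, ?_⟩
    intro p hp1 q hq
    rw [List.mem_flatMap] at hq
    obtain ⟨b, hb, hqb⟩ := hq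
    rw [h1 x p hp1, h1 b q hqb]
    exact hp.1 b hb

-- removed-branch and changed-branch of A restricted to keys present in expected
def pvGM (a : PySem.Dict String Int) (k : String) : List (String × String) :=
  if !(a.contains k) then [(k, "-" ++ k ++ " (removed)")] else []

def pvGC (e a : PySem.Dict String Int) (k : String) : List (String × String) :=
  if a.contains k && decide (e.get? k ≠ a.get? k) then [(k, "~" ++ k ++ " (changed)")] else []

theorem pv_main (e a : PySem.Dict String Int) :
    (PySem.List.sorted (PySem.Set.ofList (e.keys ++ a.keys)) (fun k => k) false).foldl
      (fun diffs k =>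
        if !(e.contains k) then diffs ++ ["+" ++ k ++ " (added)"]
        else if !(a.contains k) then diffs ++ ["-" ++ k ++ " (removed)"]
        else if e.get? k ≠ a.get? k then diffs ++ ["~" ++ k ++ " (changed)"]
        else diffs) []
    = (PySem.List.sorted
        ((PySem.Set.diff (PySem.Set.ofList a.keys) (PySem.Set.ofList e.keys)).map
            (fun k => (k, "+" ++ k ++ " (added)"))
          ++ (PySem.Set.diff (PySem.Set.ofList e.keys) (PySem.Set.ofList a.keys)).map
            (fun k => (k, "-" ++ k ++ " (removed)"))
          ++ ((PySem.Set.inter (PySem.Set.ofList e.keys) (PySem.Set.ofList a.keys)).filter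
                (fun k => decide (e.get? k ≠ a.get? k))).map
            (fun k => (k, "~" ++ k ++ " (changed)")))
        (fun p => p.1) false).map (fun p => p.2) := by
  have hbody : (fun (diffs : List String) (k : String) =>
        if !(e.contains k) then diffs ++ ["+" ++ k ++ " (added)"]
        else if !(a.contains k) then diffs ++ ["-" ++ k ++ " (removed)"]
        else if e.get? k ≠ a.get? k then diffs ++ ["~" ++ k ++ " (changed)"]
        else diffs)
      = fun diffs k => diffs ++ pvG e a k := by
    funext diffs k
    simp only [pvG]
    split_ifs <;> simp
  rw [hbody, PySem.List.foldl_append_eq_flatMap, List.nil_append]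
  -- notation
  set ek : PySem.Set String := PySem.Set.ofList e.keys with hek
  set ak : PySem.Set String := PySem.Set.ofList a.keys with hak
  set S : List String :=
    PySem.List.sorted (PySem.Set.ofList (e.keys ++ a.keys)) (fun k => k) false with hS
  -- contains on the key-sets agrees with dict membership
  have hekc : ∀ x, ek.contains x = e.contains x := by
    intro x
    rw [Bool.eq_iff_iff]
    simp [hek, PySem.Set.contains, PySem.Set.mem_ofList,
      PySem.Dict.contains_iff_mem_keys]
  have hakc : ∀ x, ak.contains x = a.contains x := by
    intro x
    rw [Bool.eq_iff_iff]
    simp [hak, PySem.Set.contains, PySem.Set.mem_ofList,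
      PySem.Dict.contains_iff_mem_keys]
  -- the union of keys, as iterated by A, is a permutation of expected-keys ++ (actual-keys - expected-keys)
  have hUperm : (PySem.Set.ofList (e.keys ++ a.keys)).Perm (ek ++ PySem.Set.diff ak ek) := by
    have hne : ek.Nodup := by rw [hek]; exact PySem.Set.nodup_ofList _
    have hna : ak.Nodup := by rw [hak]; exact PySem.Set.nodup_ofList _
    have hnd : (PySem.Set.diff ak ek).Nodup := by
      simp only [PySem.Set.diff]
      exact List.Nodup.filter _ hna
    have hdisj : ek.Disjoint (PySem.Set.diff ak ek) := by
      intro x hx1 hx2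
      simp only [PySem.Set.diff, List.mem_filter, PySem.Set.contains] at hx2
      simp at hx2
      exact hx2.2 hx1
    refine (List.perm_ext_iff_of_nodup (PySem.Set.nodup_ofList _)
      (List.Nodup.append hne hnd hdisj)).mpr ?_
    intro x
    simp only [hek, hak, PySem.Set.mem_ofList, List.mem_append, PySem.Set.diff,
      List.mem_filter, PySem.Set.contains]
    by_cases hx : x ∈ e.keys <;> simp [hx, PySem.Set.mem_ofList]
  -- the added group
  have hadded : (PySem.Set.diff ak ek).flatMap (pvGP e a)
      = (PySem.Set.diff ak ek).map (fun k => (k, "+" ++ k ++ " (added)")) := by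
    refine pv_flatMap_eq_map _ _ _ ?_
    intro x hx
    rw [PySem.Set.diff, List.mem_filter] at hx
    have hc : e.contains x = false := by
      rw [← hekc]
      simpa using hx.2
    simp [pvGP, pvG, hc]
  -- on expected keys, A's branch splits into the removed and changed groups
  have hsplit1 : ek.flatMap (pvGP e a) = ek.flatMap (fun k => pvGM a k ++ pvGC e a k) := by
    refine pv_flatMap_congr_mem _ _ _ ?_
    intro x hx
    have hc : e.contains x = true := by
      rw [← hekc]
      simp [PySem.Set.contains, hx]
    simp only [pvGP, pvG, pvGM, pvGC, hc, Bool.not_true, Bool.false_eq_true, if_false]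
    by_cases h1 : a.contains x = true
    · by_cases h2 : e.get? x = a.get? x <;> simp [h1, h2]
    · simp [Bool.eq_false_iff.mpr h1]
  have hgm : ek.flatMap (pvGM a)
      = (PySem.Set.diff ek ak).map (fun k => (k, "-" ++ k ++ " (removed)")) := by
    have h1 : PySem.Set.diff ek ak = ek.filter (fun k => !(a.contains k)) := by
      rw [PySem.Set.diff]
      exact List.filter_congr (fun x _ => by rw [hakc])
    rw [h1, ← pv_flatMap_if_singleton]
    rfl
  have hgc : ek.flatMap (pvGC e a)
      = ((PySem.Set.inter ek ak).filter (fun k => decide (e.get? k ≠ a.get? k))).map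
          (fun k => (k, "~" ++ k ++ " (changed)")) := by
    have h1 : (PySem.Set.inter ek ak).filter (fun k => decide (e.get? k ≠ a.get? k))
        = ek.filter (fun k => a.contains k && decide (e.get? k ≠ a.get? k)) := by
      rw [PySem.Set.inter, List.filter_filter]
      exact List.filter_congr (fun x _ => by rw [hakc, Bool.and_comm])
    rw [h1, ← pv_flatMap_if_singleton]
    rfl
  -- the whole pair list of B is a permutation of A's per-key expansion
  have hperm : (S.flatMap (pvGP e a)).Perm
      ((PySem.Set.diff ak ek).map (fun k => (k, "+" ++ k ++ " (added)"))
        ++ (PySem.Set.diff ek ak).map (fun k => (k, "-" ++ k ++ " (removed)"))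
        ++ ((PySem.Set.inter ek ak).filter (fun k => decide (e.get? k ≠ a.get? k))).map
            (fun k => (k, "~" ++ k ++ " (changed)"))) := by
    refine ((PySem.List.sorted_perm _ _ _).flatMap (fun _ _ => List.Perm.refl _)).trans ?_
    refine (hUperm.flatMap (fun _ _ => List.Perm.refl _)).trans ?_
    rw [List.flatMap_append, hadded, hsplit1]
    refine (((pv_flatMap_append_perm ek (pvGM a) (pvGC e a)).append_right _)).trans ?_
    rw [hgm, hgc]
    refine List.perm_append_comm.trans ?_
    rw [← List.append_assoc]
  -- A's expansion lists pairs in strictly increasing key order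
  have hpw : (S.flatMap (pvGP e a)).Pairwise (fun p q => p.1 < q.1) := by
    refine pv_pairwise_flatMap S (pvGP e a) ?_ ?_ ?_
    · intro k p hp
      simp only [pvGP, List.mem_map] at hp
      obtain ⟨m, -, rfl⟩ := hp
      rfl
    · intro k
      simp only [pvGP, pvG]
      split_ifs <;> simp
    · exact PySem.List.sorted_ofList_pairwise_lt _
  rw [PySem.List.sorted_eq_of_perm_of_pairwise_lt _ _ _ hperm hpw, List.map_flatMap]
  refine pv_flatMap_congr_mem _ _ _ ?_
  intro x _
  simp [pvGP, List.map_map]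

-- ===== VERDICT (by name: the statement is the Claim_ definition above) =====
theorem dict_diff_keys_py_spec : Claim_equal_dict_diff_keys_py := by
  intro expected actual _
  unfold Spec_dict_diff_keys_py dict_diff_keys_py dict_diff_keys_py_alt
  exact pv_main (PySem.Dict.ofList expected) (PySem.Dict.ofList actual)
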